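-- pv_equiv track=rewrite | github.com/LeoMSgit/Projetos_Pessoais | Tests and Exercices/Python/Sprint Training/SprintTraining.py | getMostVisited
-- ===== SOURCE A (Python) =====
-- def getMostVisited(n, sprints):
--     difference = [0] * (n + 2)  # 1-based indexing with extra space to avoid index issues
--     for i in range(len(sprints) - 1):
--         start = sprints[i]
--         end = sprints[i + 1]
--         if start < end:
--             difference[start] += 1
--             difference[end + 1] -= 1
--         else:
--             difference[end] += 1
--             difference[start + 1] -= 1
--     max_visits = 0
--     result = 1
--     current_visits = 0
--     for marker in range(1, n + 1):
--         current_visits += difference[marker]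
--         if current_visits > max_visits:
--             max_visits = current_visits
--             result = marker
--         elif current_visits == max_visits and marker < result:
--             result = marker
--     return result
-- ===== SOURCE B (Python) =====
-- def getMostVisited(n, sprints):
--     counts = [0] * (n + 1)
--     for a, b in zip(sprints, sprints[1:]):
--         low, high = sorted((a, b))
--         for s in range(low, high + 1):
--             counts[s] += 1
--     best = 0
--     result = 1
--     for marker in range(1, n + 1):
--         if counts[marker] > best:
--             best = counts[marker]
--             result = marker
--     return result
-- ===== Notes on version B (the rewrite author's own statement) =====
-- stated objective: simpler
-- what changed: Replaces the difference-array build plus running prefix-sum sweep by a direct count array: each consecutive sprint interval increments every station it covers, then a plain max-scan picks the first most-visited station.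
-- outside the precondition, e.g. on getMostVisited(7, [5, -4]): A returns 5, B returns 4; on getMostVisited(2, [-1, -4]): A returns 1, B raises IndexError
import Mathlib
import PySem

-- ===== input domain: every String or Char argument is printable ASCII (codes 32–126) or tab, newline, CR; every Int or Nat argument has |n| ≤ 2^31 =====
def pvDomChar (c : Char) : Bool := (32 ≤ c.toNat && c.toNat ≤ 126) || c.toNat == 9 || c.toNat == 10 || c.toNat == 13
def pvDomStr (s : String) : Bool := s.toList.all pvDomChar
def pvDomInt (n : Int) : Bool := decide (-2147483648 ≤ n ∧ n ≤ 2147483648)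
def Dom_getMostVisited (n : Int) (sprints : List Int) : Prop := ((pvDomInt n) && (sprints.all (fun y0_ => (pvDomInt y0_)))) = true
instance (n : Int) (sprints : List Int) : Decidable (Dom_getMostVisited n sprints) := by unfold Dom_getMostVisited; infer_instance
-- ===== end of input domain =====

-- B replaces A's difference-array build + prefix-sum sweep by directly counting, per
-- station, the consecutive sprint intervals covering it (simpler, no auxiliary array).

-- B replaces A's difference-array build and prefix-sum sweep by directly counting, for each
-- station, the consecutive sprint intervals that cover it (simpler; no auxiliary array).

-- ===== PORT A =====
def getMostVisited (n : Int) (sprints : List Int) : Int :=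
  let difference : List Int := List.replicate (n + 2).toNat 0
  let difference :=
    (PySem.List.pyRange 0 ((sprints.length : Int) - 1) 1).foldl
      (fun diff i =>
        let start := PySem.List.pyGetD sprints i 0
        let stop := PySem.List.pyGetD sprints (i + 1) 0
        if start < stop then
          let diff := PySem.List.pySetD diff start (PySem.List.pyGetD diff start 0 + 1)
          PySem.List.pySetD diff (stop + 1) (PySem.List.pyGetD diff (stop + 1) 0 - 1)
        else
          let diff := PySem.List.pySetD diff stop (PySem.List.pyGetD diff stop 0 + 1)
          PySem.List.pySetD diff (start + 1) (PySem.List.pyGetD diff (start + 1) 0 - 1))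
      difference
  let st :=
    (PySem.List.pyRange 1 (n + 1) 1).foldl
      (fun (st : Int × Int × Int) marker =>
        let maxV := st.1
        let result := st.2.1
        let cur := st.2.2 + PySem.List.pyGetD difference marker 0
        if cur > maxV then (cur, marker, cur)
        else if cur = maxV ∧ marker < result then (maxV, marker, cur)
        else (maxV, result, cur))
      (0, 1, 0)
  st.2.1

-- ===== PORT B =====
def getMostVisited_alt (n : Int) (sprints : List Int) : Int :=
  let counts : List Int := List.replicate (n + 1).toNat 0
  let counts :=
    (sprints.zip (PySem.List.slice sprints (some 1) none)).foldl
      (fun counts p =>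
        -- sorted((a, b)) of a two-element tuple is exactly [min a b, max a b]
        let low := min p.1 p.2
        let high := max p.1 p.2
        (PySem.List.pyRange low (high + 1) 1).foldl
          (fun counts s => PySem.List.pySetD counts s (PySem.List.pyGetD counts s 0 + 1))
          counts)
      counts
  let st :=
    (PySem.List.pyRange 1 (n + 1) 1).foldl
      (fun (st : Int × Int) marker =>
        if PySem.List.pyGetD counts marker 0 > st.1 then
          (PySem.List.pyGetD counts marker 0, marker)
        else st)
      (0, 1)
  st.2

-- ===== PRECONDITION & SPEC =====
-- Pre_ admits every sprint list of length ≤ 1 (no interval exists; A returns 1) and,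
-- beyond that, the problem's natural domain (every sprint station in 1..n):
-- outside it each program either raises IndexError or returns a value distorted by
-- Python negative-index wraparound, and those accidental values sometimes disagree.
def Pre_getMostVisited (n : Int) (sprints : List Int) : Prop :=
  sprints.length ≤ 1 ∨ ∀ s ∈ sprints, 1 ≤ s ∧ s ≤ n
instance (n : Int) (sprints : List Int) : Decidable (Pre_getMostVisited n sprints) := by
  unfold Pre_getMostVisited; infer_instance
def pvWitness_getMostVisited : Int × List Int := (4, [1, 4, 2, 2])

def Spec_getMostVisited (n : Int) (sprints : List Int) (out : Int) : Prop := out = getMostVisited_alt n sprints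
instance (n : Int) (sprints : List Int) (out : Int) : Decidable (Spec_getMostVisited n sprints out) := by unfold Spec_getMostVisited; infer_instance

-- ===== CLAIM (what is proved, stated in full; the proofs are below) =====
def Claim_equal_getMostVisited : Prop := ∀ (n : Int) (sprints : List Int), Dom_getMostVisited n sprints → Pre_getMostVisited n sprints → Spec_getMostVisited n sprints (getMostVisited n sprints)

-- ===== LEMMAS AND PROOFS =====

def pvSsum (d : List Int) (a m : Int) : Int :=
  ((PySem.List.pyRange a (m + 1) 1).map (fun k => PySem.List.pyGetD d k 0)).sum

lemma pvSsum_nil (d : List Int) (a m : Int) (h : m < a) : pvSsum d a m = 0 := by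
  simp [pvSsum, PySem.List.pyRange_one_eq_nil (by omega : m + 1 ≤ a)]

lemma pvSsum_cons (d : List Int) (a m : Int) (h : a ≤ m) :
    pvSsum d a m = PySem.List.pyGetD d a 0 + pvSsum d (a + 1) m := by
  rw [pvSsum, PySem.List.pyRange_one_cons (by omega : a < m + 1)]
  simp [pvSsum]

lemma pvGetD_setD (d : List Int) (j v a : Int) (h0 : 0 ≤ j) (h2 : j < d.length)
    (ha : 0 ≤ a) (ham : a < d.length) :
    PySem.List.pyGetD (PySem.List.pySetD d j v) a 0
      = if a = j then v else PySem.List.pyGetD d a 0 := by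
  rw [PySem.List.pySetD_of_nonneg _ _ h0,
      PySem.List.pyGetD_eq_getElem _ _ ha (by simpa using ham),
      PySem.List.pyGetD_eq_getElem _ _ ha ham]
  rw [List.getElem_set]
  by_cases h : a = j
  · simp [h, show j.toNat = a.toNat by omega]
  · have : ¬ j.toNat = a.toNat := by omega
    simp [this, h]

lemma pvSsum_set (d : List Int) (j c a m : Int) (h0 : 0 ≤ j) (h2 : j < d.length)
    (hm : m < d.length) (h1 : 1 ≤ a) :
    pvSsum (PySem.List.pySetD d j (PySem.List.pyGetD d j 0 + c)) a m
      = pvSsum d a m + (if a ≤ j ∧ j ≤ m then c else 0) := by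
  have key : ∀ (k : Nat) (a : Int), 1 ≤ a → (m + 1 - a).toNat = k →
      pvSsum (PySem.List.pySetD d j (PySem.List.pyGetD d j 0 + c)) a m
        = pvSsum d a m + (if a ≤ j ∧ j ≤ m then c else 0) := by
    intro k
    induction k with
    | zero =>
      intro a ha hk
      have hma : m < a := by omega
      rw [pvSsum_nil _ _ _ hma, pvSsum_nil _ _ _ hma]
      have : ¬ (a ≤ j ∧ j ≤ m) := by omega
      simp [this]
    | succ k ih =>
      intro a ha hk
      have ham : a ≤ m := by omega
      rw [pvSsum_cons _ _ _ ham, pvSsum_cons _ _ _ ham, ih (a + 1) (by omega) (by omega),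
          pvGetD_setD d _ _ a h0 h2 (by omega) (by omega)]
      by_cases h : a = j
      · have : a ≤ j ∧ j ≤ m := by omega
        have h2' : ¬ (a + 1 ≤ j ∧ j ≤ m) := by omega
        simp [h, this]

        ring
      · have : ((a ≤ j ∧ j ≤ m) ↔ (a + 1 ≤ j ∧ j ≤ m)) := by omega
        simp [h, this]
        ring
  exact key _ a h1 rfl

def pvUpd (d : List Int) (j c : Int) : List Int :=
  PySem.List.pySetD d j (PySem.List.pyGetD d j 0 + c)

lemma length_pvUpd (d : List Int) (j c : Int) : (pvUpd d j c).length = d.length := by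
  simp [pvUpd, PySem.List.length_pySetD]

lemma pvSsum_pvUpd (d : List Int) (j c a m : Int) (h0 : 0 ≤ j) (h2 : j < d.length)
    (hm : m < d.length) (h1 : 1 ≤ a) :
    pvSsum (pvUpd d j c) a m = pvSsum d a m + (if a ≤ j ∧ j ≤ m then c else 0) :=
  pvSsum_set d j c a m h0 h2 hm h1

def pvStep (diff : List Int) (x y : Int) : List Int :=
  if x < y then pvUpd (pvUpd diff x 1) (y + 1) (-1)
  else pvUpd (pvUpd diff y 1) (x + 1) (-1)

lemma length_pvStep (diff : List Int) (x y : Int) :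
    (pvStep diff x y).length = diff.length := by
  unfold pvStep
  split_ifs <;> simp [length_pvUpd]

lemma pvSsum_pvStep (n : Int) (diff : List Int) (x y m : Int)
    (hlen : (diff.length : Int) = n + 2)
    (hx : 1 ≤ x) (hxn : x ≤ n) (hy : 1 ≤ y) (hyn : y ≤ n)
    (hm1 : 1 ≤ m) (hmn : m ≤ n) :
    pvSsum (pvStep diff x y) 1 m
      = pvSsum diff 1 m + (if min x y ≤ m ∧ m ≤ max x y then 1 else 0) := by
  by_cases h : x < y
  · rw [pvStep, if_pos h,
        pvSsum_pvUpd _ _ _ _ _ (by omega) (by rw [length_pvUpd]; omega)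
          (by rw [length_pvUpd]; omega) (by omega),
        pvSsum_pvUpd _ _ _ _ _ (by omega) (by omega) (by omega) (by omega)]
    have hmin : min x y = x := by omega
    have hmax : max x y = y := by omega
    rw [hmin, hmax]
    split_ifs <;> omega
  · rw [pvStep, if_neg h,
        pvSsum_pvUpd _ _ _ _ _ (by omega) (by rw [length_pvUpd]; omega)
          (by rw [length_pvUpd]; omega) (by omega),
        pvSsum_pvUpd _ _ _ _ _ (by omega) (by omega) (by omega) (by omega)]
    have hmin : min x y = y := by omega
    have hmax : max x y = x := by omega
    rw [hmin, hmax]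
    split_ifs <;> omega

lemma pvSsum_build (n : Int) (ps : List (Int × Int)) :
    ∀ (d : List Int), (d.length : Int) = n + 2 →
    (∀ p ∈ ps, 1 ≤ p.1 ∧ p.1 ≤ n ∧ 1 ≤ p.2 ∧ p.2 ≤ n) →
    ∀ m, 1 ≤ m → m ≤ n →
    pvSsum (ps.foldl (fun diff p => pvStep diff p.1 p.2) d) 1 m
      = pvSsum d 1 m
        + ((ps.filter (fun p => decide (min p.1 p.2 ≤ m ∧ m ≤ max p.1 p.2))).length : Int) := by
  induction ps with
  | nil => intro d hd hps m h1 h2; simp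
  | cons p ps ih =>
    intro d hd hps m h1 h2
    have hp := hps p (by simp)
    rw [List.foldl_cons, ih (pvStep d p.1 p.2)
        (by rw [length_pvStep]; exact hd)
        (fun q hq => hps q (by simp [hq])) m h1 h2,
      pvSsum_pvStep n d p.1 p.2 m hd hp.1 hp.2.1 hp.2.2.1 hp.2.2.2 h1 h2]
    by_cases hc : min p.1 p.2 ≤ m ∧ m ≤ max p.1 p.2
    · have hc' : ((p.1 ≤ m ∨ p.2 ≤ m) ∧ (m ≤ p.1 ∨ m ≤ p.2)) := by omega
      simp [List.filter_cons, hc']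
      ring
    · have hc' : ¬ ((p.1 ≤ m ∨ p.2 ≤ m) ∧ (m ≤ p.1 ∨ m ≤ p.2)) := by omega
      simp [List.filter_cons, hc']

lemma length_foldl_pvUpd (l : List Int) :
    ∀ (counts : List Int), (l.foldl (fun c s => pvUpd c s 1) counts).length = counts.length := by
  induction l with
  | nil => intro counts; rfl
  | cons x t ih => intro counts; rw [List.foldl_cons, ih, length_pvUpd]

lemma pvCnt_inner (hi m : Int) :
    ∀ (k : Nat) (lo : Int) (counts : List Int), (hi + 1 - lo).toNat = k →
    0 ≤ lo → hi < counts.length → 0 ≤ m → m < counts.length →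
    PySem.List.pyGetD ((PySem.List.pyRange lo (hi + 1) 1).foldl
        (fun c s => pvUpd c s 1) counts) m 0
      = PySem.List.pyGetD counts m 0 + (if lo ≤ m ∧ m ≤ hi then 1 else 0) := by
  intro k
  induction k with
  | zero =>
    intro lo counts hk _ _ _ _
    rw [PySem.List.pyRange_one_eq_nil (by omega), List.foldl_nil]
    have : ¬ (lo ≤ m ∧ m ≤ hi) := by omega
    simp [this]
  | succ k ih =>
    intro lo counts hk hlo hhi hm0 hml
    rw [PySem.List.pyRange_one_cons (by omega), List.foldl_cons,
      ih (lo + 1) (pvUpd counts lo 1) (by omega) (by omega)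
        (by rw [length_pvUpd]; omega) hm0 (by rw [length_pvUpd]; omega)]
    rw [pvUpd, pvGetD_setD counts lo _ m hlo (by omega) hm0 hml]
    by_cases h : m = lo
    · have h1 : lo ≤ m ∧ m ≤ hi := by omega
      have h2 : ¬ (lo + 1 ≤ m ∧ m ≤ hi) := by omega
      simp [h, h1, h2]
      omega
    · have h1 : ((lo ≤ m ∧ m ≤ hi) ↔ (lo + 1 ≤ m ∧ m ≤ hi)) := by omega
      simp [h, h1]

lemma pvCnt_build (n : Int) (ps : List (Int × Int)) :
    ∀ (counts : List Int), (counts.length : Int) = n + 1 →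
    (∀ p ∈ ps, 1 ≤ p.1 ∧ p.1 ≤ n ∧ 1 ≤ p.2 ∧ p.2 ≤ n) →
    ∀ m, 1 ≤ m → m ≤ n →
    PySem.List.pyGetD (ps.foldl
        (fun c p => (PySem.List.pyRange (min p.1 p.2) (max p.1 p.2 + 1) 1).foldl
          (fun c s => pvUpd c s 1) c) counts) m 0
      = PySem.List.pyGetD counts m 0
        + ((ps.filter (fun p => decide (min p.1 p.2 ≤ m ∧ m ≤ max p.1 p.2))).length : Int) := by
  induction ps with
  | nil => intro counts _ _ m _ _; simp
  | cons p ps ih =>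
    intro counts hlen hps m h1 h2
    have hp := hps p (by simp)
    rw [List.foldl_cons, ih _ (by rw [length_foldl_pvUpd]; exact hlen)
        (fun q hq => hps q (by simp [hq])) m h1 h2,
      pvCnt_inner (max p.1 p.2) m (max p.1 p.2 + 1 - min p.1 p.2).toNat (min p.1 p.2) counts rfl
        (by omega) (by omega) (by omega) (by omega)]
    by_cases hc : min p.1 p.2 ≤ m ∧ m ≤ max p.1 p.2
    · have hc' : ((p.1 ≤ m ∨ p.2 ≤ m) ∧ (m ≤ p.1 ∨ m ≤ p.2)) := by omega
      simp [List.filter_cons, hc']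
      ring
    · have hc' : ¬ ((p.1 ≤ m ∨ p.2 ≤ m) ∧ (m ≤ p.1 ∨ m ≤ p.2)) := by omega
      simp [List.filter_cons, hc']


lemma pvZipfoldNat {β : Type} (g : β → Int → Int → β) :
    ∀ (xs : List Int) (b : β),
    (List.range (xs.length - 1)).foldl
        (fun acc j => g acc (xs.getD j 0) (xs.getD (j + 1) 0)) b
      = (xs.zip xs.tail).foldl (fun acc p => g acc p.1 p.2) b
  | [], b => by simp
  | [x], b => by simp
  | x :: y :: t, b => by
    have h : (x :: y :: t).length - 1 = (y :: t).length - 1 + 1 := by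
      simp
    rw [h, List.range_succ_eq_map, List.foldl_cons, List.foldl_map]
    have hb : ∀ (acc : β) (j : Nat),
        g acc ((x :: y :: t).getD (j + 1) 0) ((x :: y :: t).getD (j + 1 + 1) 0)
          = g acc ((y :: t).getD j 0) ((y :: t).getD (j + 1) 0) := by
      intro acc j; simp
    calc (List.range ((y :: t).length - 1)).foldl
          (fun acc j => g acc ((x :: y :: t).getD (j + 1) 0) ((x :: y :: t).getD (j + 1 + 1) 0))
          (g b x y)
        = (List.range ((y :: t).length - 1)).foldl
          (fun acc j => g acc ((y :: t).getD j 0) ((y :: t).getD (j + 1) 0)) (g b x y) := by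
          exact PySem.List.foldl_congr_mem _ _ _ _ (fun acc j _ => hb acc j)
      _ = ((y :: t).zip (y :: t).tail).foldl (fun acc p => g acc p.1 p.2) (g b x y) :=
          pvZipfoldNat g (y :: t) (g b x y)
      _ = ((x :: y :: t).zip (x :: y :: t).tail).foldl (fun acc p => g acc p.1 p.2) b := by
          simp

lemma pvZipfold {β : Type} (g : β → Int → Int → β) (xs : List Int) (b : β) :
    (PySem.List.pyRange 0 ((xs.length : Int) - 1) 1).foldl
        (fun acc i => g acc (PySem.List.pyGetD xs i 0) (PySem.List.pyGetD xs (i + 1) 0)) b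
      = (xs.zip xs.tail).foldl (fun acc p => g acc p.1 p.2) b := by
  rw [PySem.List.pyRange_one, List.foldl_map]
  have h1 : ((xs.length : Int) - 1 - 0).toNat = xs.length - 1 := by omega
  rw [h1, ← pvZipfoldNat g xs b]
  apply PySem.List.foldl_congr_mem
  intro acc j hj
  have hjlt : j < xs.length - 1 := List.mem_range.mp hj
  have e1 : (0 : Int) + (j : Int) = ((j : Nat) : Int) := by omega
  have e2 : (j : Int) + 1 = ((j + 1 : Nat) : Int) := by push_cast; ring
  rw [e1, e2, PySem.List.pyGetD_natCast, PySem.List.pyGetD_natCast]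

lemma pvGetD_replicate (k : Nat) (a : Int) (ha : 0 ≤ a) :
    PySem.List.pyGetD (List.replicate k (0 : Int)) a 0 = 0 := by
  by_cases h : a < (k : Int)
  · rw [PySem.List.pyGetD_eq_getElem _ _ ha (by simpa using h)]
    simp
  · simp [PySem.List.pyGetD, PySem.List.pyGet?, PySem.List.pyIdx?, ha, h]

lemma pvSsum_replicate (k : Nat) (a m : Int) (ha : 1 ≤ a) :
    pvSsum (List.replicate k (0 : Int)) a m = 0 := by
  have key : ∀ (c : Nat) (a : Int), 1 ≤ a → (m + 1 - a).toNat = c →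
      pvSsum (List.replicate k (0 : Int)) a m = 0 := by
    intro c
    induction c with
    | zero => intro a h hk; exact pvSsum_nil _ _ _ (by omega)
    | succ c ih =>
      intro a h hk
      rw [pvSsum_cons _ _ _ (by omega), pvGetD_replicate _ _ (by omega),
        ih (a + 1) (by omega) (by omega)]
      ring
  exact key _ a ha rfl

lemma pvSweep (n : Int) (d : List Int) (C : Int → Int) :
    ∀ (k : Nat) (a maxV res cur : Int), (n + 1 - a).toNat = k → res ≤ a → 1 ≤ a →
    (∀ m, a ≤ m → m ≤ n → C m = cur + pvSsum d a m) →
    ((PySem.List.pyRange a (n + 1) 1).foldl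
        (fun (st : Int × Int × Int) marker =>
          let maxV := st.1
          let result := st.2.1
          let cur := st.2.2 + PySem.List.pyGetD d marker 0
          if cur > maxV then (cur, marker, cur)
          else if cur = maxV ∧ marker < result then (maxV, marker, cur)
          else (maxV, result, cur))
        (maxV, res, cur)).2.1
      = ((PySem.List.pyRange a (n + 1) 1).foldl
          (fun (st : Int × Int) marker =>
            if C marker > st.1 then (C marker, marker) else st)
          (maxV, res)).2 := by
  intro k
  induction k with
  | zero =>
    intro a maxV res cur hk _ _ _
    rw [PySem.List.pyRange_one_eq_nil (by omega)]
    simp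
  | succ k ih =>
    intro a maxV res cur hk hres ha hsum
    rw [PySem.List.pyRange_one_cons (by omega), List.foldl_cons, List.foldl_cons]
    have hCa : C a = cur + PySem.List.pyGetD d a 0 := by
      rw [hsum a (by omega) (by omega), pvSsum_cons _ _ _ (by omega),
        pvSsum_nil _ _ _ (by omega)]
      ring
    have hsum' : ∀ m, a + 1 ≤ m → m ≤ n →
        C m = (cur + PySem.List.pyGetD d a 0) + pvSsum d (a + 1) m := by
      intro m h1 h2
      rw [hsum m (by omega) h2, pvSsum_cons _ _ _ (by omega)]
      ring
    dsimp only
    by_cases hgt : cur + PySem.List.pyGetD d a 0 > maxV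
    · rw [if_pos hgt, if_pos (by omega : C a > maxV), hCa]
      exact ih (a + 1) (cur + PySem.List.pyGetD d a 0) a (cur + PySem.List.pyGetD d a 0)
        (by omega) (by omega) (by omega) hsum'
    · have h2 : ¬ (cur + PySem.List.pyGetD d a 0 = maxV ∧ a < res) := by omega
      rw [if_neg hgt, if_neg h2, if_neg (by omega : ¬ C a > maxV)]
      exact ih (a + 1) maxV res (cur + PySem.List.pyGetD d a 0) (by omega) (by omega)
        (by omega) hsum'

theorem pvMain (n : Int) (sprints : List Int)
    (hn : 0 ≤ n) (hs : ∀ s ∈ sprints, 1 ≤ s ∧ s ≤ n) :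
    getMostVisited n sprints = getMostVisited_alt n sprints := by
  unfold getMostVisited getMostVisited_alt
  rw [PySem.List.slice_from_one]
  dsimp only
  -- A's build loop is the pair fold of pvStep
  have hbody : (fun (diff : List Int) (i : Int) =>
      let start := PySem.List.pyGetD sprints i 0
      let stop := PySem.List.pyGetD sprints (i + 1) 0
      if start < stop then
        let diff := PySem.List.pySetD diff start (PySem.List.pyGetD diff start 0 + 1)
        PySem.List.pySetD diff (stop + 1) (PySem.List.pyGetD diff (stop + 1) 0 - 1)
      else
        let diff := PySem.List.pySetD diff stop (PySem.List.pyGetD diff stop 0 + 1)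
        PySem.List.pySetD diff (start + 1) (PySem.List.pyGetD diff (start + 1) 0 - 1))
      = fun diff i => pvStep diff (PySem.List.pyGetD sprints i 0)
          (PySem.List.pyGetD sprints (i + 1) 0) := by
    funext diff i
    simp only [pvStep, pvUpd, sub_eq_add_neg]
  rw [hbody, pvZipfold (fun acc x y => pvStep acc x y) sprints]
  -- B's build loop is the pair fold of per-station increments
  have hbodyB : (fun (counts : List Int) (p : Int × Int) =>
      let low := min p.1 p.2
      let high := max p.1 p.2
      (PySem.List.pyRange low (high + 1) 1).foldl
        (fun counts s => PySem.List.pySetD counts s (PySem.List.pyGetD counts s 0 + 1))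
        counts)
      = fun c p => (PySem.List.pyRange (min p.1 p.2) (max p.1 p.2 + 1) 1).foldl
          (fun c s => pvUpd c s 1) c := by
    funext c p
    simp only [pvUpd]
  rw [hbodyB]
  set pairs := sprints.zip sprints.tail with hpairs
  set d : List Int := pairs.foldl (fun acc p => pvStep acc p.1 p.2)
    (List.replicate (n + 2).toNat 0) with hd
  set cnt : List Int := pairs.foldl
    (fun c p => (PySem.List.pyRange (min p.1 p.2) (max p.1 p.2 + 1) 1).foldl
      (fun c s => pvUpd c s 1) c) (List.replicate (n + 1).toNat 0) with hcnt
  have hbounds : ∀ p ∈ pairs, 1 ≤ p.1 ∧ p.1 ≤ n ∧ 1 ≤ p.2 ∧ p.2 ≤ n := by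
    intro p hp
    have h1 := (List.of_mem_zip hp).1
    have h2 := List.mem_of_mem_tail (List.of_mem_zip hp).2
    exact ⟨(hs _ h1).1, (hs _ h1).2, (hs _ h2).1, (hs _ h2).2⟩
  have hsum : ∀ m, (1 : Int) ≤ m → m ≤ n →
      PySem.List.pyGetD cnt m 0 = 0 + pvSsum d 1 m := by
    intro m h1 h2
    rw [hd, pvSsum_build n pairs _ (by simp; omega) hbounds m h1 h2,
      pvSsum_replicate _ _ _ le_rfl,
      hcnt, pvCnt_build n pairs _ (by simp; omega) hbounds m h1 h2,
      pvGetD_replicate _ _ (by omega)]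
    ring
  exact pvSweep n d (fun m => PySem.List.pyGetD cnt m 0) (n + 1 - 1).toNat 1 0 1 0
    rfl le_rfl le_rfl hsum

theorem pvMain0 (n : Int) (sprints : List Int) (hlen : sprints.length ≤ 1) :
    getMostVisited n sprints = getMostVisited_alt n sprints := by
  unfold getMostVisited getMostVisited_alt
  rw [PySem.List.slice_from_one]
  dsimp only
  have hpairs : sprints.zip sprints.tail = [] := by
    match sprints, hlen with
    | [], _ => rfl
    | [x], _ => rfl
  have hrange : PySem.List.pyRange 0 ((sprints.length : Int) - 1) 1 = [] := by
    apply PySem.List.pyRange_one_eq_nil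
    omega
  rw [hpairs, hrange, List.foldl_nil, List.foldl_nil]
  exact pvSweep n (List.replicate (n + 2).toNat 0)
    (fun m => PySem.List.pyGetD (List.replicate (n + 1).toNat 0) m 0)
    (n + 1 - 1).toNat 1 0 1 0 rfl le_rfl le_rfl
    (fun m h1 h2 => by
      have hr := pvGetD_replicate (n + 1).toNat m (by omega)
      simp [pvSsum_replicate _ _ _ le_rfl, hr])

-- ===== VERDICT (by name: the statement is the Claim_ definition above) =====
theorem getMostVisited_spec : Claim_equal_getMostVisited := by
  intro n sprints _ hpre
  unfold Spec_getMostVisited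
  rcases hpre with h | h
  · exact (pvMain0 n sprints h).symm ▸ rfl
  · match sprints, h with
    | [], _ => exact pvMain0 n [] (by simp)
    | x :: t, h =>
      have hx := h x (by simp)
      exact pvMain n (x :: t) (by omega) h
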